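-- pv_equiv track=rewrite | github.com/The0Jan/Naive_Bayes_Classifier | main.py | make_plot_read
-- ===== SOURCE A (Python) =====
-- def make_plot_read(data):
--     data_read = [[0],[0]]
--     for outcome in data:
--         data_read[0].append(outcome[0])
--         data_read[1].append(outcome[1])
--
--     data_read[0].append(1)
--     data_read[1].append(1)
--
--     return data_read
-- ===== SOURCE B (Python) =====
-- def make_plot_read(data):
--     def tails(rows):
--         # recursion on the structure: the trailing sentinel 1 is the base case,
--         # elements are prepended back-to-front on the way out of the recursion
--         if not rows:
--             return [1], [1]
--         xs, ys = tails(rows[1:])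
--         return [rows[0][0]] + xs, [rows[0][1]] + ys
--     xs, ys = tails(data)
--     return [[0] + xs, [0] + ys]
-- ===== Notes on version B (the rewrite author's own statement) =====
-- stated objective: alternative
-- what changed: Replaces A's forward loop appending into two accumulator lists with a structural recursion that builds both columns back-to-front, planting the trailing 1 sentinels at the base case and prepending elements on the way out.
import Mathlib
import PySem

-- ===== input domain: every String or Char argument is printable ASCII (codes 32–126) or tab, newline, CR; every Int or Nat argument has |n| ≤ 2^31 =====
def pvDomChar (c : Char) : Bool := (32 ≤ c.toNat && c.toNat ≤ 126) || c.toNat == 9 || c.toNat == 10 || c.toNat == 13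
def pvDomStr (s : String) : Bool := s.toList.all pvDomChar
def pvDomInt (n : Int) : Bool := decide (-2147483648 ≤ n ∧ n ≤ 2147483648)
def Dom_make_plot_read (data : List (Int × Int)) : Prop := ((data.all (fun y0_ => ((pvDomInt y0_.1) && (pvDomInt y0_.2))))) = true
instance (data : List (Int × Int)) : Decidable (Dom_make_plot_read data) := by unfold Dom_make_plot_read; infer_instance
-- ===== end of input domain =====

-- B replaces A's forward loop with two accumulators by a structural recursion building both
-- columns back-to-front (trailing 1 sentinels at the base case); objective: alternative.

-- ===== PORT A =====
-- loop appending each row's components to the two accumulator rows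
def make_plot_read (data : List (Int × Int)) : List (List Int) :=
  let s := data.foldl (fun (s : List Int × List Int) outcome =>
    (s.1 ++ [outcome.1], s.2 ++ [outcome.2])) ([0], [0])
  [s.1 ++ [1], s.2 ++ [1]]

-- ===== PORT B =====
-- recursive helper: base case gives the trailing sentinels, elements are consed on the way out
def mprTails : List (Int × Int) → List Int × List Int
  | [] => ([1], [1])
  | r :: rest =>
    let p := mprTails rest
    (r.1 :: p.1, r.2 :: p.2)

def make_plot_read_alt (data : List (Int × Int)) : List (List Int) :=
  let p := mprTails data
  [0 :: p.1, 0 :: p.2]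

-- ===== PRECONDITION & SPEC =====
def Spec_make_plot_read (data : List (Int × Int)) (out : List (List Int)) : Prop := out = make_plot_read_alt data
instance (data : List (Int × Int)) (out : List (List Int)) : Decidable (Spec_make_plot_read data out) := by unfold Spec_make_plot_read; infer_instance

-- ===== CLAIM =====
def Claim_equal_make_plot_read : Prop := ∀ (data : List (Int × Int)), Dom_make_plot_read data → Spec_make_plot_read data (make_plot_read data)

-- ===== LEMMAS AND PROOFS =====

-- loop invariant for A's fold: it appends the two columns to the accumulators
theorem make_plot_read_foldl (data : List (Int × Int)) (a b : List Int) :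
    data.foldl (fun (s : List Int × List Int) outcome =>
      (s.1 ++ [outcome.1], s.2 ++ [outcome.2])) (a, b)
    = (a ++ data.map Prod.fst, b ++ data.map Prod.snd) := by
  induction data generalizing a b with
  | nil => simp
  | cons h t ih => simp [List.foldl, ih]

-- characterisation of B's recursion: both columns followed by the trailing sentinel
theorem mprTails_eq (data : List (Int × Int)) :
    mprTails data = (data.map Prod.fst ++ [1], data.map Prod.snd ++ [1]) := by
  induction data with
  | nil => rfl
  | cons h t ih => simp [mprTails, ih]

-- ===== VERDICT =====
theorem make_plot_read_spec : Claim_equal_make_plot_read := by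
  intro data _
  unfold Spec_make_plot_read make_plot_read make_plot_read_alt
  simp [make_plot_read_foldl, mprTails_eq]
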